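-- pv_equiv track=rewrite | github.com/estnltk/estnltk | estnltk/grammarextractor/production.py | divide_to_buckets
-- ===== SOURCE A (Python) =====
-- def divide_to_buckets(elements):
--     buckets = []
--     cur_bucket = []
--     for elem in elements:
--         if elem == '|':
--             buckets.append(cur_bucket)
--             cur_bucket = []
--         else:
--             cur_bucket.append(elem)
--     if len(cur_bucket) > 0:
--         buckets.append(cur_bucket)
--     return buckets
-- ===== SOURCE B (Python) =====
-- def divide_to_buckets(elements):
--     if '|' in elements:
--         i = elements.index('|')
--         return [elements[:i]] + divide_to_buckets(elements[i + 1:])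
--     return [elements] if elements else []
-- ===== Notes on version B (the rewrite author's own statement) =====
-- stated objective: alternative
-- what changed: Replaces the single-pass accumulator loop (buckets + cur_bucket mutable state) by structural recursion: split the list at the first '|' via index/slicing and recurse on the tail; the base case naturally reproduces the drop-a-trailing-empty-bucket behaviour.
import Mathlib
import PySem

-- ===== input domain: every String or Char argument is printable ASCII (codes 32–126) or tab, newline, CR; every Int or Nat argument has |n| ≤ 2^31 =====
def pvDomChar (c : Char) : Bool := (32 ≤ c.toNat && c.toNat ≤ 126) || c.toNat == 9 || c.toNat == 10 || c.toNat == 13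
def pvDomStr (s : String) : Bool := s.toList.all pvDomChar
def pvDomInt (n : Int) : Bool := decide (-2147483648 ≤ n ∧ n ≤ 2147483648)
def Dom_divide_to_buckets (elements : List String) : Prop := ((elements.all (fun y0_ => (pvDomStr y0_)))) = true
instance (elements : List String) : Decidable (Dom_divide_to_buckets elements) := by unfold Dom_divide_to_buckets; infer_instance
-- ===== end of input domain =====

-- B re-implements A's accumulator loop as structural recursion splitting at the first '|';
-- equivalence of return values is proved on all inputs (objective: alternative decomposition, same cost).

-- ===== PORT A =====
-- step of A's for-loop: state is (buckets, cur_bucket)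
def dtbStep (s : List (List String) × List String) (elem : String) :
    List (List String) × List String :=
  if elem = "|" then (s.1 ++ [s.2], []) else (s.1, s.2 ++ [elem])

def divide_to_buckets (elements : List String) : List (List String) :=
  let st := elements.foldl dtbStep ([], [])
  if st.2.length > 0 then st.1 ++ [st.2] else st.1

-- ===== PORT B =====
-- elements[:i] / elements[i+1:] with 0 ≤ i < len: exact as take i / drop (i+1);
-- elements.index('|') (which exists here) is List.idxOf.
def divide_to_buckets_alt (elements : List String) : List (List String) :=
  if h : "|" ∈ elements then
    elements.take (elements.idxOf "|") ::
      divide_to_buckets_alt (elements.drop (elements.idxOf "|" + 1))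
  else if elements = [] then [] else [elements]
termination_by elements.length
decreasing_by
  have hi : elements.idxOf "|" < elements.length := List.idxOf_lt_length_of_mem h
  simp only [List.length_drop]
  omega

-- ===== CLAIM (what is proved, stated in full; the proofs are below) =====
def Spec_divide_to_buckets (elements : List String) (out : List (List String)) : Prop := out = divide_to_buckets_alt elements
instance (elements : List String) (out : List (List String)) : Decidable (Spec_divide_to_buckets elements out) := by unfold Spec_divide_to_buckets; infer_instance

def Claim_equal_divide_to_buckets : Prop := ∀ (elements : List String), Dom_divide_to_buckets elements → Spec_divide_to_buckets elements (divide_to_buckets elements)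

-- ===== LEMMAS AND PROOFS =====

-- the accumulated buckets factor out of A's fold
theorem dtb_fold_acc (l : List String) (acc : List (List String)) (cur : List String) :
    l.foldl dtbStep (acc, cur) =
      (acc ++ (l.foldl dtbStep ([], cur)).1, (l.foldl dtbStep ([], cur)).2) := by
  induction l generalizing acc cur with
  | nil => simp
  | cons e t ih =>
    simp only [List.foldl_cons, dtbStep]
    by_cases he : e = "|"
    · simp only [he, if_true]
      rw [ih (acc ++ [cur]) [], List.nil_append, ih [cur] []]
      simp
    · simp only [if_neg he]
      exact ih acc (cur ++ [e])

-- a separator-free segment just extends cur_bucket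
theorem dtb_fold_no_sep (l : List String) (acc : List (List String)) (cur : List String)
    (h : "|" ∉ l) : l.foldl dtbStep (acc, cur) = (acc, cur ++ l) := by
  induction l generalizing cur with
  | nil => simp
  | cons e t ih =>
    have he : e ≠ "|" := fun hc => h (hc ▸ List.mem_cons_self)
    simp only [List.foldl_cons, dtbStep, if_neg he]
    rw [ih (cur ++ [e]) (fun hm => h (List.mem_cons_of_mem _ hm))]
    simp

theorem dtb_main (elements : List String) :
    divide_to_buckets elements = divide_to_buckets_alt elements := by
  induction hn : elements.length using Nat.strong_induction_on generalizing elements with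
  | _ n ih =>
  subst hn
  by_cases h : "|" ∈ elements
  · have hi : elements.idxOf "|" < elements.length := List.idxOf_lt_length_of_mem h
    have hget : elements[elements.idxOf "|"] = "|" := List.getElem_idxOf hi
    have hsplit : elements =
        elements.take (elements.idxOf "|") ++ "|" :: elements.drop (elements.idxOf "|" + 1) := by
      conv_lhs => rw [← List.take_append_drop (elements.idxOf "|") elements]
      rw [← List.getElem_cons_drop hi, hget]
    have hnot : "|" ∉ elements.take (elements.idxOf "|") := by
      intro hm
      have := (List.mem_take_iff_idxOf_lt h).1 hm
      omega
    rw [divide_to_buckets_alt, dif_pos h]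
    have hlen : (elements.drop (elements.idxOf "|" + 1)).length < elements.length := by
      simp only [List.length_drop]; omega
    rw [← ih _ hlen _ rfl]
    unfold divide_to_buckets
    conv_lhs => rw [hsplit]
    rw [List.foldl_append, dtb_fold_no_sep _ _ _ hnot]
    simp only [List.foldl_cons, dtbStep, if_true, List.nil_append]
    rw [dtb_fold_acc]
    by_cases hc : ((elements.drop (elements.idxOf "|" + 1)).foldl dtbStep ([], [])).2.length > 0
    · simp [hc]
    · simp [hc]
  · rw [divide_to_buckets_alt, dif_neg h]
    unfold divide_to_buckets
    rw [dtb_fold_no_sep _ _ _ h]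
    cases elements with
    | nil => simp
    | cons e t => simp

-- ===== VERDICT (by name: the statement is the Claim_ definition above) =====
theorem divide_to_buckets_spec : Claim_equal_divide_to_buckets := by
  intro elements _
  exact dtb_main elements
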